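-- pv_equiv track=rewrite | github.com/Joentze/IS469-research | retrieval/agentic/traditional-rag.py | enforce_chunk_size_rules
-- ===== SOURCE A (Python) =====
-- MAX_SENTENCES_PER_CHUNK = 6
--
-- MIN_SENTENCES_PER_CHUNK = 2
--
-- def _normalize_breakpoints(raw_breakpoints: list[int], sentence_count: int) -> list[int]:
--     """Keep sorted valid sentence-end indexes for chunk boundaries."""
--     if sentence_count <= 1:
--         return []
--     return sorted({idx for idx in raw_breakpoints if 0 <= idx < sentence_count - 1})
--
-- def _fallback_breakpoints(sentence_count: int) -> list[int]:
--     """Deterministic fallback if the chunking agent output is invalid."""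
--     if sentence_count <= MAX_SENTENCES_PER_CHUNK:
--         return []
--
--     breaks: list[int] = []
--     idx = MAX_SENTENCES_PER_CHUNK - 1
--     while idx < sentence_count - 1:
--         breaks.append(idx)
--         idx += MAX_SENTENCES_PER_CHUNK
--     return breaks
--
-- def enforce_chunk_size_rules(breaks: list[int], sentence_count: int) -> list[int]:
--     """Adjust boundaries to avoid tiny chunks and very large chunks."""
--     if sentence_count <= 1:
--         return []
--
--     all_breaks = _normalize_breakpoints(breaks, sentence_count)
--     if not all_breaks:
--         return _fallback_breakpoints(sentence_count)
--
--     filtered: list[int] = []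
--     start = 0
--     for brk in all_breaks:
--         chunk_len = brk - start + 1
--         if chunk_len >= MIN_SENTENCES_PER_CHUNK:
--             filtered.append(brk)
--             start = brk + 1
--
--     with_caps: list[int] = []
--     start = 0
--     for brk in filtered + [sentence_count - 1]:
--         while brk - start + 1 > MAX_SENTENCES_PER_CHUNK:
--             cap_break = start + MAX_SENTENCES_PER_CHUNK - 1
--             if cap_break < sentence_count - 1:
--                 with_caps.append(cap_break)
--             start = cap_break + 1
--         if brk < sentence_count - 1:
--             with_caps.append(brk)
--         start = brk + 1
--
--     return _normalize_breakpoints(with_caps, sentence_count)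
-- ===== SOURCE B (Python) =====
-- MAX_SENTENCES_PER_CHUNK = 6
--
-- MIN_SENTENCES_PER_CHUNK = 2
--
-- def enforce_chunk_size_rules(breaks: list[int], sentence_count: int) -> list[int]:
--     """One greedy sweep: accept a valid break only if the chunk it closes is big
--     enough, emitting forced cap breaks on the way; then cap the trailing segment."""
--     if sentence_count <= 1:
--         return []
--     out: list[int] = []
--     start = 0
--     for b in sorted({i for i in breaks if 0 <= i < sentence_count - 1}):
--         if b - start + 1 >= MIN_SENTENCES_PER_CHUNK:
--             while b - start + 1 > MAX_SENTENCES_PER_CHUNK: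
--                 out.append(start + MAX_SENTENCES_PER_CHUNK - 1)
--                 start += MAX_SENTENCES_PER_CHUNK
--             out.append(b)
--             start = b + 1
--     while sentence_count - start > MAX_SENTENCES_PER_CHUNK:
--         out.append(start + MAX_SENTENCES_PER_CHUNK - 1)
--         start += MAX_SENTENCES_PER_CHUNK
--     return out
-- ===== Notes on version B (the rewrite author's own statement) =====
-- stated objective: simpler
-- what changed: A's three separate phases (min-size filter pass over the breaks, then a cap-splitting pass with a final re-sort/dedup normalization, plus a dedicated fallback generator for the no-valid-breaks case) are fused into one greedy sweep that emits forced cap breaks and accepted breaks in order as it goes, with one trailing cap loop subsuming the fallback branch.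
import Mathlib
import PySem

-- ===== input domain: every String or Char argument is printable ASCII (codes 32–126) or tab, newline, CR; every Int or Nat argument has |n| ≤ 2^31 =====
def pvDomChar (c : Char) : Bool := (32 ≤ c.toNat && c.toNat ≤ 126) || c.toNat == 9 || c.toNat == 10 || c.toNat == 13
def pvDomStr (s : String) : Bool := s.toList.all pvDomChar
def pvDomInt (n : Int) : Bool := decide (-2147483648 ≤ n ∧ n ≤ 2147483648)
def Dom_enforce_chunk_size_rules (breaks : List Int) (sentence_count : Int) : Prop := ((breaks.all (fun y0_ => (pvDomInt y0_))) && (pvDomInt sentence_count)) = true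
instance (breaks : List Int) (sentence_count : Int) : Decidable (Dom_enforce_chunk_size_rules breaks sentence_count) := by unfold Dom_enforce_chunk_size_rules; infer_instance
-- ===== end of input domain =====

-- B collapses A's min-filter pass, cap-split pass, fallback branch and final
-- re-normalization into a single greedy sweep (objective: simpler).

-- ===== PORT A =====
-- _normalize_breakpoints: sorted({idx for idx in raw if 0 <= idx < sentence_count - 1})
def pvNormalize (raw : List Int) (sc : Int) : List Int :=
  if sc ≤ 1 then []
  else PySem.List.sorted
    (PySem.Set.ofList (raw.filter (fun i => decide (0 ≤ i) && decide (i < sc - 1))))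
    (fun x => x) false

-- the while-loop of _fallback_breakpoints
def pvFallbackLoop (sc idx : Int) (acc : List Int) : List Int :=
  if idx < sc - 1 then pvFallbackLoop sc (idx + 6) (acc ++ [idx]) else acc
termination_by (sc - 1 - idx).toNat
decreasing_by omega

def pvFallback (sc : Int) : List Int :=
  if sc ≤ 6 then [] else pvFallbackLoop sc (6 - 1) []

-- the inner while-loop of the cap pass (returns (with_caps, start))
def pvCapWhile (sc brk start : Int) (acc : List Int) : List Int × Int :=
  if brk - start + 1 > 6 then
    pvCapWhile sc brk ((start + 6 - 1) + 1)
      (if start + 6 - 1 < sc - 1 then acc ++ [start + 6 - 1] else acc)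
  else (acc, start)
termination_by (brk - start).toNat
decreasing_by omega

def enforce_chunk_size_rules (breaks : List Int) (sentence_count : Int) : List Int :=
  if sentence_count ≤ 1 then []
  else
    let all_breaks := pvNormalize breaks sentence_count
    if all_breaks = [] then pvFallback sentence_count
    else
      let fp := all_breaks.foldl
        (fun (p : List Int × Int) brk =>
          if brk - p.2 + 1 ≥ 2 then (p.1 ++ [brk], brk + 1) else p) ([], 0)
      let wc := (fp.1 ++ [sentence_count - 1]).foldl
        (fun (p : List Int × Int) brk =>
          let q := pvCapWhile sentence_count brk p.2 p.1
          ((if brk < sentence_count - 1 then q.1 ++ [brk] else q.1), brk + 1)) ([], 0)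
      pvNormalize wc.1 sentence_count

-- ===== PORT B =====
-- the inner while-loop of B's sweep (emit caps before an accepted break)
def pvAltCapWhile (b start : Int) (out : List Int) : List Int × Int :=
  if b - start + 1 > 6 then pvAltCapWhile b (start + 6) (out ++ [start + 6 - 1])
  else (out, start)
termination_by (b - start).toNat
decreasing_by omega

-- the trailing while-loop of B
def pvAltTrail (sc start : Int) (out : List Int) : List Int :=
  if sc - start > 6 then pvAltTrail sc (start + 6) (out ++ [start + 6 - 1]) else out
termination_by (sc - start).toNat
decreasing_by omega

def enforce_chunk_size_rules_alt (breaks : List Int) (sentence_count : Int) : List Int :=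
  if sentence_count ≤ 1 then []
  else
    let p := (PySem.List.sorted
        (PySem.Set.ofList (breaks.filter (fun i => decide (0 ≤ i) && decide (i < sentence_count - 1))))
        (fun x => x) false).foldl
      (fun (p : List Int × Int) b =>
        if b - p.2 + 1 ≥ 2 then
          let q := pvAltCapWhile b p.2 p.1
          (q.1 ++ [b], b + 1)
        else p) ([], 0)
    pvAltTrail sentence_count p.2 p.1

-- ===== PRECONDITION & SPEC =====
def Spec_enforce_chunk_size_rules (breaks : List Int) (sentence_count : Int) (out : List Int) : Prop := out = enforce_chunk_size_rules_alt breaks sentence_count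
instance (breaks : List Int) (sentence_count : Int) (out : List Int) : Decidable (Spec_enforce_chunk_size_rules breaks sentence_count out) := by unfold Spec_enforce_chunk_size_rules; infer_instance

-- ===== CLAIM (what is proved, stated in full; the proofs are below) =====
def Claim_equal_enforce_chunk_size_rules : Prop := ∀ (breaks : List Int) (sentence_count : Int), Dom_enforce_chunk_size_rules breaks sentence_count → Spec_enforce_chunk_size_rules breaks sentence_count (enforce_chunk_size_rules breaks sentence_count)

-- ===== LEMMAS AND PROOFS =====

-- clean recursive forms of the loops (proof-side only)

/-- A's min-filter pass as a structural recursion. -/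
def filtA : List Int → Int → List Int
  | [], _ => []
  | b :: r, s => if b - s + 1 ≥ 2 then b :: filtA r (b + 1) else filtA r s

/-- caps emitted by A's inner while for one break. -/
def capsA (sc b s : Int) : List Int :=
  if b - s + 1 > 6 then (if s + 5 < sc - 1 then [s + 5] else []) ++ capsA sc b (s + 6)
  else []
termination_by (b - s).toNat
decreasing_by omega

/-- caps emitted by B's inner while. -/
def capsL (b s : Int) : List Int :=
  if b - s + 1 > 6 then (s + 5) :: capsL b (s + 6) else []
termination_by (b - s).toNat
decreasing_by omega

/-- B's trailing loop as a list producer. -/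
def trailL (sc s : Int) : List Int :=
  if sc - s > 6 then (s + 5) :: trailL sc (s + 6) else []
termination_by (sc - s).toNat
decreasing_by omega

/-- A's cap pass over the filtered breaks. -/
def capA (sc : Int) : List Int → Int → List Int
  | [], _ => []
  | b :: r, s => capsA sc b s ++ (if b < sc - 1 then [b] else []) ++ capA sc r (b + 1)

/-- B's fused sweep (including the trailing loop). -/
def bfB (sc : Int) : List Int → Int → List Int
  | [], s => trailL sc s
  | b :: r, s => if b - s + 1 ≥ 2 then capsL b s ++ b :: bfB sc r (b + 1) else bfB sc r s


-- fuel-style lemmas about the while-loops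

lemma capsA_eq_capsL_aux (sc b : Int) (hb : b < sc - 1) :
    ∀ n (s : Int), (b - s).toNat ≤ n → capsA sc b s = capsL b s := by
  intro n
  induction n with
  | zero =>
    intro s h
    rw [capsA, capsL]
    have hc : ¬ (b - s + 1 > 6) := by omega
    simp [hc]
  | succ n ih =>
    intro s h
    rw [capsA, capsL]
    by_cases hc : b - s + 1 > 6
    · have hin : s + 5 < sc - 1 := by omega
      simp [hc, hin]
      exact ih (s + 6) (by omega)
    · simp [hc]

lemma capsA_eq_capsL (sc b : Int) (hb : b < sc - 1) (s : Int) :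
    capsA sc b s = capsL b s :=
  capsA_eq_capsL_aux sc b hb (b - s).toNat s le_rfl

lemma capsA_last_aux (sc : Int) :
    ∀ n (s : Int), (sc - 1 - s).toNat ≤ n → capsA sc (sc - 1) s = trailL sc s := by
  intro n
  induction n with
  | zero =>
    intro s h
    rw [capsA, trailL]
    have hc : ¬ (sc - 1 - s + 1 > 6) := by omega
    have hc' : ¬ (sc - s > 6) := by omega
    simp [hc, hc']
  | succ n ih =>
    intro s h
    rw [capsA, trailL]
    by_cases hc : sc - 1 - s + 1 > 6
    · have hc' : sc - s > 6 := by omega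
      have hin : s + 5 < sc - 1 := by omega
      simp [hc, hc', hin]
      exact ih (s + 6) (by omega)
    · have hc' : ¬ (sc - s > 6) := by omega
      simp [hc, hc']

lemma capsA_last (sc s : Int) : capsA sc (sc - 1) s = trailL sc s :=
  capsA_last_aux sc (sc - 1 - s).toNat s le_rfl

lemma pvCapWhile_fst_aux (sc b : Int) :
    ∀ n (s : Int) (acc : List Int), (b - s).toNat ≤ n →
      (pvCapWhile sc b s acc).1 = acc ++ capsA sc b s := by
  intro n
  induction n with
  | zero =>
    intro s acc h
    rw [pvCapWhile, capsA]
    have hc : ¬ (b - s + 1 > 6) := by omega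
    simp [hc]
  | succ n ih =>
    intro s acc h
    rw [pvCapWhile, capsA]
    by_cases hc : b - s + 1 > 6
    · simp only [hc, if_pos]
      rw [ih (s + 6 - 1 + 1) _ (by omega)]
      have he : s + 6 - 1 = s + 5 := by omega
      by_cases hin : s + 6 - 1 < sc - 1
      · have hin' : s + 5 < sc - 1 := by omega
        simp [hin, hin', he]
        rw [show s + 5 + 1 = s + 6 from by omega]
      · have hin' : ¬ (s + 5 < sc - 1) := by omega
        simp [hin, hin', he]
        rw [show s + 5 + 1 = s + 6 from by omega]
    · simp [hc]

lemma pvCapWhile_fst (sc b s : Int) (acc : List Int) :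
    (pvCapWhile sc b s acc).1 = acc ++ capsA sc b s :=
  pvCapWhile_fst_aux sc b (b - s).toNat s acc le_rfl

lemma pvAltCapWhile_fst_aux (b : Int) :
    ∀ n (s : Int) (out : List Int), (b - s).toNat ≤ n →
      (pvAltCapWhile b s out).1 = out ++ capsL b s := by
  intro n
  induction n with
  | zero =>
    intro s out h
    rw [pvAltCapWhile, capsL]
    have hc : ¬ (b - s + 1 > 6) := by omega
    simp [hc]
  | succ n ih =>
    intro s out h
    rw [pvAltCapWhile, capsL]
    by_cases hc : b - s + 1 > 6
    · simp only [hc, if_pos]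
      rw [ih (s + 6) _ (by omega)]
      simp [show s + 6 - 1 = s + 5 from by omega]
    · simp [hc]

lemma pvAltCapWhile_fst (b s : Int) (out : List Int) :
    (pvAltCapWhile b s out).1 = out ++ capsL b s :=
  pvAltCapWhile_fst_aux b (b - s).toNat s out le_rfl

lemma pvAltTrail_eq_aux (sc : Int) :
    ∀ n (s : Int) (out : List Int), (sc - s).toNat ≤ n →
      pvAltTrail sc s out = out ++ trailL sc s := by
  intro n
  induction n with
  | zero =>
    intro s out h
    rw [pvAltTrail, trailL]
    have hc : ¬ (sc - s > 6) := by omega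
    simp [hc]
  | succ n ih =>
    intro s out h
    rw [pvAltTrail, trailL]
    by_cases hc : sc - s > 6
    · simp only [hc, if_pos]
      rw [ih (s + 6) _ (by omega)]
      simp [show s + 6 - 1 = s + 5 from by omega]
    · simp [hc]

lemma pvAltTrail_eq (sc s : Int) (out : List Int) :
    pvAltTrail sc s out = out ++ trailL sc s :=
  pvAltTrail_eq_aux sc (sc - s).toNat s out le_rfl

lemma pvFallbackLoop_eq_aux (sc : Int) :
    ∀ n (s : Int) (acc : List Int), (sc - s).toNat ≤ n →
      pvFallbackLoop sc (s + 5) acc = acc ++ trailL sc s := by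
  intro n
  induction n with
  | zero =>
    intro s acc h
    rw [pvFallbackLoop, trailL]
    have hc : ¬ (s + 5 < sc - 1) := by omega
    have hc' : ¬ (sc - s > 6) := by omega
    simp [hc, hc']
  | succ n ih =>
    intro s acc h
    rw [pvFallbackLoop, trailL]
    by_cases hc : s + 5 < sc - 1
    · have hc' : sc - s > 6 := by omega
      simp only [hc, hc', if_pos]
      have : s + 5 + 6 = (s + 6) + 5 := by ring
      rw [this, ih (s + 6) _ (by omega)]
      simp
    · have hc' : ¬ (sc - s > 6) := by omega
      simp [hc, hc']

lemma pvFallback_eq (sc : Int) : pvFallback sc = trailL sc 0 := by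
  rw [pvFallback]
  by_cases h : sc ≤ 6
  · rw [trailL]
    have : ¬ (sc - 0 > 6) := by omega
    simp [h, this]
  · simp only [h, if_neg, if_false]
    have := pvFallbackLoop_eq_aux sc (sc - 0).toNat 0 [] le_rfl
    simpa using this

-- fold bridges

lemma foldl_min_eq (V : List Int) : ∀ (acc : List Int) (s : Int),
    (V.foldl (fun (p : List Int × Int) brk =>
      if brk - p.2 + 1 ≥ 2 then (p.1 ++ [brk], brk + 1) else p) (acc, s)).1
    = acc ++ filtA V s := by
  induction V with
  | nil => intro acc s; simp [filtA]
  | cons b r ih =>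
    intro acc s
    by_cases hc : b - s + 1 ≥ 2
    · simp only [List.foldl_cons, hc, if_pos, filtA]
      rw [ih (acc ++ [b]) (b + 1)]
      simp [hc]
    · simp only [List.foldl_cons, hc, if_false, filtA]
      rw [ih acc s]

lemma foldl_cap_eq (sc : Int) (L : List Int) : ∀ (acc : List Int) (s : Int),
    (L.foldl (fun (p : List Int × Int) brk =>
      let q := pvCapWhile sc brk p.2 p.1
      ((if brk < sc - 1 then q.1 ++ [brk] else q.1), brk + 1)) (acc, s)).1
    = acc ++ capA sc L s := by
  induction L with
  | nil => intro acc s; simp [capA]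
  | cons b r ih =>
    intro acc s
    simp only [List.foldl_cons, capA]
    by_cases hc : b < sc - 1
    · rw [if_pos hc, ih, pvCapWhile_fst]
      simp [hc]
    · rw [if_neg hc, ih, pvCapWhile_fst]
      simp [hc]

lemma foldl_b_eq (sc : Int) (V : List Int) : ∀ (acc : List Int) (s : Int),
    pvAltTrail sc
      (V.foldl (fun (p : List Int × Int) b =>
        if b - p.2 + 1 ≥ 2 then
          let q := pvAltCapWhile b p.2 p.1
          (q.1 ++ [b], b + 1)
        else p) (acc, s)).2
      (V.foldl (fun (p : List Int × Int) b =>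
        if b - p.2 + 1 ≥ 2 then
          let q := pvAltCapWhile b p.2 p.1
          (q.1 ++ [b], b + 1)
        else p) (acc, s)).1
    = acc ++ bfB sc V s := by
  induction V with
  | nil =>
    intro acc s
    simp only [List.foldl_nil, bfB]
    exact pvAltTrail_eq sc s acc
  | cons b r ih =>
    intro acc s
    by_cases hc : b - s + 1 ≥ 2
    · simp only [List.foldl_cons, hc, if_pos, bfB]
      rw [ih, pvAltCapWhile_fst]
      simp [hc]
    · simp only [List.foldl_cons, hc, if_false, bfB]
      rw [ih acc s]

-- the main fusion lemma: A's three phases = B's single sweep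

lemma capA_eq_bfB (sc : Int) (V : List Int) (hV : ∀ b ∈ V, b < sc - 1) :
    ∀ s : Int, capA sc (filtA V s ++ [sc - 1]) s = bfB sc V s := by
  induction V with
  | nil =>
    intro s
    simp [filtA, capA, bfB, capsA_last]
  | cons b r ih =>
    intro s
    have hb : b < sc - 1 := hV b (by simp)
    have hr : ∀ x ∈ r, x < sc - 1 := fun x hx => hV x (by simp [hx])
    by_cases hc : b - s + 1 ≥ 2
    · simp only [filtA, hc, if_pos, bfB, List.cons_append, capA]
      rw [ih hr (b + 1), capsA_eq_capsL sc b hb s]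
      simp [hb]
    · simp only [filtA, hc, if_neg, if_false, bfB]
      exact ih hr s

-- result-shape invariants (strictly increasing, in range)

lemma capsL_props (b : Int) :
    ∀ n (s : Int), (b - s).toNat ≤ n →
      (capsL b s).Pairwise (· < ·) ∧ ∀ x ∈ capsL b s, s ≤ x ∧ x < b := by
  intro n
  induction n with
  | zero =>
    intro s h
    rw [capsL]
    have hc : ¬ (b - s + 1 > 6) := by omega
    simp [hc]
  | succ n ih =>
    intro s h
    rw [capsL]
    by_cases hc : b - s + 1 > 6
    · obtain ⟨hp, hm⟩ := ih (s + 6) (by omega)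
      simp only [hc, if_pos, List.pairwise_cons]
      refine ⟨⟨fun x hx => by have := hm x hx; omega, hp⟩, ?_⟩
      intro x hx
      rcases List.mem_cons.mp hx with h1 | h1
      · omega
      · have := hm x h1; omega
    · simp [hc]

lemma trailL_props (sc : Int) :
    ∀ n (s : Int), (sc - s).toNat ≤ n →
      (trailL sc s).Pairwise (· < ·) ∧ ∀ x ∈ trailL sc s, s ≤ x ∧ x < sc - 1 := by
  intro n
  induction n with
  | zero =>
    intro s h
    rw [trailL]
    have hc : ¬ (sc - s > 6) := by omega
    simp [hc]
  | succ n ih =>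
    intro s h
    rw [trailL]
    by_cases hc : sc - s > 6
    · obtain ⟨hp, hm⟩ := ih (s + 6) (by omega)
      simp only [hc, if_pos, List.pairwise_cons]
      refine ⟨⟨fun x hx => by have := hm x hx; omega, hp⟩, ?_⟩
      intro x hx
      rcases List.mem_cons.mp hx with h1 | h1
      · omega
      · have := hm x h1; omega
    · simp [hc]

lemma bfB_props (sc : Int) (V : List Int) (hV : ∀ b ∈ V, b < sc - 1) :
    ∀ s : Int, (bfB sc V s).Pairwise (· < ·) ∧
      ∀ x ∈ bfB sc V s, s ≤ x ∧ x < sc - 1 := by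
  induction V with
  | nil =>
    intro s
    exact trailL_props sc (sc - s).toNat s le_rfl
  | cons b r ih =>
    intro s
    have hb : b < sc - 1 := hV b (by simp)
    have hr : ∀ x ∈ r, x < sc - 1 := fun x hx => hV x (by simp [hx])
    rw [bfB]
    by_cases hc : b - s + 1 ≥ 2
    · obtain ⟨hp1, hm1⟩ := capsL_props b (b - s).toNat s le_rfl
      obtain ⟨hp2, hm2⟩ := ih hr (b + 1)
      simp only [hc, if_pos]
      constructor
      · rw [List.pairwise_append]
        refine ⟨hp1, ?_, ?_⟩
        · rw [List.pairwise_cons]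
          exact ⟨fun x hx => by have := hm2 x hx; omega, hp2⟩
        · intro x hx y hy
          have h1 := hm1 x hx
          rcases List.mem_cons.mp hy with h2 | h2
          · omega
          · have := hm2 y h2; omega
      · intro x hx
        rcases List.mem_append.mp hx with h1 | h1
        · have := hm1 x h1; omega
        · rcases List.mem_cons.mp h1 with h2 | h2
          · omega
          · have := hm2 x h2; omega
    · simp only [hc, if_neg, if_false]
      exact ih hr s

-- pvNormalize is the identity on a strictly increasing in-range list

lemma foldl_set_add_self : ∀ (l acc : List Int), l.Nodup → (∀ x ∈ l, x ∉ acc) →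
    l.foldl PySem.Set.add acc = acc ++ l := by
  intro l
  induction l with
  | nil => intro acc _ _; simp
  | cons b r ih =>
    intro acc hnd hdisj
    have hb : b ∉ acc := hdisj b (by simp)
    have hadd : PySem.Set.add acc b = acc ++ [b] := by
      simp [PySem.Set.add, PySem.Set.contains]
      intro h
      exact absurd h hb
    simp only [List.foldl_cons, hadd]
    rw [ih (acc ++ [b]) (List.nodup_cons.mp hnd).2]
    · simp
    · intro x hx
      simp only [List.mem_append, List.mem_singleton]
      rintro (h | h)
      · exact hdisj x (by simp [hx]) h
      · exact absurd (h ▸ hx) (List.nodup_cons.mp hnd).1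
    
lemma pvNormalize_id (l : List Int) (sc : Int) (hsc : ¬ sc ≤ 1)
    (hp : l.Pairwise (· < ·)) (hb : ∀ x ∈ l, 0 ≤ x ∧ x < sc - 1) :
    pvNormalize l sc = l := by
  rw [pvNormalize, if_neg hsc]
  have hfilter : l.filter (fun i => decide (0 ≤ i) && decide (i < sc - 1)) = l := by
    apply List.filter_eq_self.mpr
    intro x hx
    have := hb x hx
    simp [this.1, this.2]
  rw [hfilter]
  have hnd : l.Nodup := hp.imp (fun h => ne_of_lt h)
  have hofl : PySem.Set.ofList l = l := by
    have := foldl_set_add_self l [] hnd (by simp)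
    simpa [PySem.Set.ofList] using this
  rw [hofl]
  exact PySem.List.sorted_eq_of_perm_of_pairwise_lt l l (fun x => x) (List.Perm.refl l) hp

-- ===== VERDICT (by name: the statement is the Claim_ definition above) =====
theorem enforce_chunk_size_rules_spec : Claim_equal_enforce_chunk_size_rules := by
  intro breaks sc _
  unfold Spec_enforce_chunk_size_rules enforce_chunk_size_rules enforce_chunk_size_rules_alt
  by_cases h1 : sc ≤ 1
  · simp [h1]
  · simp only [h1, if_neg, if_false]
    set V := PySem.List.sorted
      (PySem.Set.ofList (breaks.filter (fun i => decide (0 ≤ i) && decide (i < sc - 1))))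
      (fun x => x) false with hVdef
    have hVn : pvNormalize breaks sc = V := by rw [pvNormalize, if_neg h1]
    have hVlt : ∀ b ∈ V, b < sc - 1 := by
      intro b hbV
      have : b ∈ breaks.filter (fun i => decide (0 ≤ i) && decide (i < sc - 1)) := by
        rw [hVdef] at hbV
        exact (PySem.Set.mem_ofList _ b).mp ((PySem.List.mem_sorted _ _ _ b).mp hbV)
      have h3 := List.of_mem_filter this
      simp only [Bool.and_eq_true, decide_eq_true_eq] at h3
      exact h3.2
    rw [hVn]
    by_cases hV : V = []
    · simp only [hV, if_pos, List.foldl_nil]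
      rw [pvFallback_eq, pvAltTrail_eq]
      simp only [List.nil_append]
    · simp only [hV, if_neg, if_false]
      rw [foldl_b_eq sc V [] 0]
      rw [foldl_cap_eq, foldl_min_eq]
      simp only [List.nil_append]
      rw [capA_eq_bfB sc V hVlt 0]
      obtain ⟨hp, hm⟩ := bfB_props sc V hVlt 0
      exact pvNormalize_id _ sc h1 hp (fun x hx => ⟨(hm x hx).1, (hm x hx).2⟩)
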